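-- pv_equiv track=rewrite | github.com/sbamboo/ObjectiveCli | libs/packaged/Drawlib2/manip.py | fillShape
-- ===== SOURCE A (Python) =====
-- def fillShape(texture=list,backgroundChars=[" "],fillChar=str):
--     nTex = []
--     for line in texture:
--         sline = list(line)
--         si = None
--         ei = None
--         nline = ""
--         chars = []
--         for i,char in enumerate(sline):
--             if char not in backgroundChars:
--                 chars.append(i)
--         si = min(chars)
--         ei = max(chars)
--         indexes = list(range(si + 1, ei))
--         for index in indexes:
--             if 0 <= index < len(sline) and sline[index] in backgroundChars:
--                 sline[index] = fillChar
--         nline = ''.join(sline)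
--         nTex.append(nline)
--     return nTex
-- ===== SOURCE B (Python) =====
-- def fillShape(texture=list, backgroundChars=[" "], fillChar=str):
--     # Per-character formulation: a character becomes fillChar iff it is a
--     # background char and some non-background char occurs strictly before it
--     # AND strictly after it.  One left-to-right pass records "seen non-bg so
--     # far" flags; one right-to-left pass carries the symmetric flag and emits
--     # the output characters directly.  No index collection, no min/max, no
--     # mutation; an all-background
--     # line has no shape boundary: raise ValueError (as A does, from min([])).
--     result = []
--     for line in texture:
--         flags = []
--         seen = False
--         for c in line:
--             flags.append(seen)
--             seen = seen or c not in backgroundChars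
--         if not seen:
--             raise ValueError("fillShape: line has no non-background character")
--         pieces = []
--         seen_right = False
--         for c, left in reversed(list(zip(line, flags))):
--             bg = c in backgroundChars
--             pieces.append(fillChar if bg and left and seen_right else c)
--             seen_right = seen_right or not bg
--         result.append(''.join(reversed(pieces)))
--     return result
-- ===== Notes on version B (the rewrite author's own statement) =====
-- stated objective: alternative
-- what changed: A collects all non-background indices per line, takes min/max and mutates the char list over the index range between them; B never computes any index or extremum: it decides each character locally from two directional 'seen a non-background char' flags (a forward flag pass and a backward emitting pass), so filling becomes a per-character predicate instead of a range update.
import Mathlib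
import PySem

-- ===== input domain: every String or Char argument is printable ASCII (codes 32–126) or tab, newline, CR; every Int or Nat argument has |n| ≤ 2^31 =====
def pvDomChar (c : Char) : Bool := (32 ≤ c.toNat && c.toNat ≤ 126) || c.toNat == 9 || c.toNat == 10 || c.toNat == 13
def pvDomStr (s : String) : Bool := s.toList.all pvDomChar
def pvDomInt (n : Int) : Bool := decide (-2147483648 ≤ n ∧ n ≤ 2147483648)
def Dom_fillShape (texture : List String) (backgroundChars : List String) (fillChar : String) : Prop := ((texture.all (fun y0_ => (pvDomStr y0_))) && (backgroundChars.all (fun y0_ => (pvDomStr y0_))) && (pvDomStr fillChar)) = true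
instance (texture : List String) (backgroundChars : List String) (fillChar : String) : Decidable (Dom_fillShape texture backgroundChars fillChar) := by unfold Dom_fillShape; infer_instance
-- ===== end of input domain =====

set_option maxRecDepth 4000


-- B drops A's index collection + min/max + in-place range update entirely: each character is decided
-- locally from two directional "seen a non-background char" flag passes (alternative algorithm, same cost).

-- ===== PORT A =====
-- list(line) turns a Python string into a list of 1-character strings:
def pvToStr (c : Char) : String := String.ofList [c]

def fillShapeLine (backgroundChars : List String) (fillChar : String) (line : String) : String :=
  let sline : List String := line.toList.map pvToStr
  let chars : List Int := (PySem.List.enumerate sline 0).foldl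
      (fun acc q => if !(backgroundChars.contains q.2) then acc ++ [q.1] else acc) []
  let si : Int := (PySem.List.min? chars (fun x => x)).getD 0   -- min([]) raises ValueError: outside Pre_
  let ei : Int := (PySem.List.max? chars (fun x => x)).getD 0
  let sline2 := (PySem.List.pyRange (si + 1) ei 1).foldl
      (fun l idx =>
        if 0 ≤ idx ∧ idx < (l.length : Int) ∧ backgroundChars.contains (l.getD idx.toNat "")
        then l.set idx.toNat fillChar else l) sline
  PySem.Str.join "" sline2

def fillShape (texture : List String) (backgroundChars : List String) (fillChar : String) : List String :=
  texture.foldl (fun nTex line => nTex ++ [fillShapeLine backgroundChars fillChar line]) []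

-- ===== PORT B =====
def pvIsBg (backgroundChars : List String) (c : Char) : Bool := backgroundChars.contains (String.ofList [c])

-- Source B's forward pass: flags[i] = "a non-background char was seen strictly before position i"
def leftFlags (backgroundChars : List String) : List Char → Bool → List Bool
  | [], _ => []
  | c :: t, seen => seen :: leftFlags backgroundChars t (seen || !(pvIsBg backgroundChars c))

-- Source B's backward pass over the zipped (char, flag) list: emits the output chars while carrying
-- seen_right; python appends to `pieces` and reverses at the end, which this prepending recursion is.
def buildR (backgroundChars : List String) (fillChar : String) : List (Char × Bool) → List Char × Bool
  | [] => ([], false)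
  | p :: t =>
      let r := buildR backgroundChars fillChar t
      ((if pvIsBg backgroundChars p.1 && p.2 && r.2 then fillChar.toList else [p.1]) ++ r.1,
       r.2 || !(pvIsBg backgroundChars p.1))

-- final value of Source B's `seen` after the forward pass (same loop, flag only)
def leftFlagsSeen (backgroundChars : List String) : List Char → Bool → Bool
  | [], seen => seen
  | c :: t, seen => leftFlagsSeen backgroundChars t (seen || !(pvIsBg backgroundChars c))

def fillShapeLineAlt (backgroundChars : List String) (fillChar : String) (line : String) : String :=
  let cs := line.toList
  if !(leftFlagsSeen backgroundChars cs false) then line  -- Source B raises ValueError here (outside Pre_); placeholder value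
  else String.ofList (buildR backgroundChars fillChar (cs.zip (leftFlags backgroundChars cs false))).1

def fillShape_alt (texture : List String) (backgroundChars : List String) (fillChar : String) : List String :=
  texture.map (fillShapeLineAlt backgroundChars fillChar)

-- ===== PRECONDITION & SPEC =====
-- Pre_ excludes exactly the inputs where A raises: a line (possibly empty) all of whose characters
-- are background characters makes A's min(chars) a ValueError on the empty list.
def Pre_fillShape (texture : List String) (backgroundChars : List String) (fillChar : String) : Prop :=
  texture.all (fun line => line.toList.any (fun c => !(pvIsBg backgroundChars c))) = true
instance (texture : List String) (backgroundChars : List String) (fillChar : String) : Decidable (Pre_fillShape texture backgroundChars fillChar) := by unfold Pre_fillShape; infer_instance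

def pvWitness_fillShape : List String × List String × String := ([" x .x ", "ab"], [" ", "."], "#")

def Spec_fillShape (texture : List String) (backgroundChars : List String) (fillChar : String) (out : List String) : Prop := out = fillShape_alt texture backgroundChars fillChar
instance (texture : List String) (backgroundChars : List String) (fillChar : String) (out : List String) : Decidable (Spec_fillShape texture backgroundChars fillChar out) := by unfold Spec_fillShape; infer_instance

-- ===== CLAIM (what is proved, stated in full; the proofs are below) =====
def Claim_equal_fillShape : Prop := ∀ (texture : List String) (backgroundChars : List String) (fillChar : String), Dom_fillShape texture backgroundChars fillChar → Pre_fillShape texture backgroundChars fillChar → Spec_fillShape texture backgroundChars fillChar (fillShape texture backgroundChars fillChar)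

-- ===== LEMMAS AND PROOFS =====

-- number of leading background characters (proof-only helper)
def pvLeadBg (backgroundChars : List String) : List Char → Nat
  | [] => 0
  | c :: t => if pvIsBg backgroundChars c then pvLeadBg backgroundChars t + 1 else 0

-- indices (from s) of the non-background characters of cs, in order (proof-only helper)
def nbIdx (backgroundChars : List String) : List Char → Int → List Int
  | [], _ => []
  | c :: t, s => if pvIsBg backgroundChars c then nbIdx backgroundChars t (s + 1)
                 else s :: nbIdx backgroundChars t (s + 1)

theorem nbIdx_cons_pos (bgs : List String) (c : Char) (t : List Char) (s : Int)
    (h : pvIsBg bgs c = true) : nbIdx bgs (c :: t) s = nbIdx bgs t (s + 1) := by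
  simp only [nbIdx]; rw [if_pos h]

theorem nbIdx_cons_neg (bgs : List String) (c : Char) (t : List Char) (s : Int)
    (h : pvIsBg bgs c = false) : nbIdx bgs (c :: t) s = s :: nbIdx bgs t (s + 1) := by
  simp only [nbIdx]; rw [if_neg (by simp [h])]

theorem leadBg_cons_pos (bgs : List String) (c : Char) (t : List Char)
    (h : pvIsBg bgs c = true) : pvLeadBg bgs (c :: t) = pvLeadBg bgs t + 1 := by
  simp only [pvLeadBg]; rw [if_pos h]

theorem leadBg_cons_neg (bgs : List String) (c : Char) (t : List Char)
    (h : pvIsBg bgs c = false) : pvLeadBg bgs (c :: t) = 0 := by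
  simp only [pvLeadBg]; rw [if_neg (by simp [h])]

theorem chars_eq_nbIdx (bgs : List String) (cs : List Char) : ∀ (s : Int) (acc : List Int),
    (PySem.List.enumerate (cs.map pvToStr) s).foldl
      (fun acc q => if !(bgs.contains q.2) then acc ++ [q.1] else acc) acc
    = acc ++ nbIdx bgs cs s := by
  induction cs with
  | nil => intro s acc; simp [nbIdx]
  | cons c t ih =>
      intro s acc
      have hpv : bgs.contains (pvToStr c) = pvIsBg bgs c := rfl
      simp only [List.map_cons, PySem.List.enumerate_cons, List.foldl_cons]
      by_cases h : pvIsBg bgs c = true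
      · rw [hpv, h, if_neg (by simp), ih (s+1) acc, nbIdx_cons_pos bgs c t s h]
      · simp only [Bool.not_eq_true] at h
        rw [hpv, h, if_pos (by simp), ih (s+1) (acc ++ [s]), nbIdx_cons_neg bgs c t s h,
          List.append_assoc]
        rfl

theorem mem_nbIdx_ge (bgs : List String) (cs : List Char) : ∀ (s x : Int), x ∈ nbIdx bgs cs s → s ≤ x := by
  induction cs with
  | nil => intro s x hx; simp [nbIdx] at hx
  | cons c t ih =>
      intro s x hx
      by_cases h : pvIsBg bgs c = true
      · rw [nbIdx_cons_pos bgs c t s h] at hx; have := ih (s+1) x hx; omega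
      · rw [nbIdx_cons_neg bgs c t s (by simpa using h)] at hx
        rcases List.mem_cons.mp hx with rfl | hm
        · omega
        · have := ih (s+1) x hm; omega

theorem nbIdx_pairwise (bgs : List String) (cs : List Char) : ∀ (s : Int), (nbIdx bgs cs s).Pairwise (· ≤ ·) := by
  induction cs with
  | nil => intro s; simp [nbIdx]
  | cons c t ih =>
      intro s
      by_cases h : pvIsBg bgs c = true
      · rw [nbIdx_cons_pos bgs c t s h]; exact ih (s+1)
      · rw [nbIdx_cons_neg bgs c t s (by simpa using h)]
        exact List.pairwise_cons.mpr
          ⟨fun x hx => by have := mem_nbIdx_ge bgs t (s+1) x hx; omega, ih (s+1)⟩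

theorem nbIdx_ne_nil (bgs : List String) (cs : List Char) (s : Int)
    (h : ∃ c ∈ cs, pvIsBg bgs c = false) : nbIdx bgs cs s ≠ [] := by
  induction cs generalizing s with
  | nil => simp at h
  | cons c t ih =>
      rcases h with ⟨c0, hc0, hf⟩
      by_cases hbg : pvIsBg bgs c = true
      · rw [nbIdx_cons_pos bgs c t s hbg]
        rcases List.mem_cons.mp hc0 with rfl | hm
        · rw [hbg] at hf; exact Bool.noConfusion hf
        · exact ih (s+1) ⟨c0, hm, hf⟩
      · rw [nbIdx_cons_neg bgs c t s (by simpa using hbg)]; simp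

theorem leadBg_lt (bgs : List String) (cs : List Char)
    (h : ∃ c ∈ cs, pvIsBg bgs c = false) : pvLeadBg bgs cs < cs.length := by
  induction cs with
  | nil => simp at h
  | cons c t ih =>
      rcases h with ⟨c0, hc0, hf⟩
      by_cases hbg : pvIsBg bgs c = true
      · rw [leadBg_cons_pos bgs c t hbg]
        rcases List.mem_cons.mp hc0 with rfl | hm
        · rw [hbg] at hf; exact Bool.noConfusion hf
        · have := ih ⟨c0, hm, hf⟩; simp only [List.length_cons]; omega
      · rw [leadBg_cons_neg bgs c t (by simpa using hbg)]; simp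

theorem nbIdx_head? (bgs : List String) (cs : List Char) : ∀ (s : Int), nbIdx bgs cs s ≠ [] →
    (nbIdx bgs cs s).head? = some (s + (pvLeadBg bgs cs : Int)) := by
  induction cs with
  | nil => intro s h; simp [nbIdx] at h
  | cons c t ih =>
      intro s h
      by_cases hbg : pvIsBg bgs c = true
      · rw [nbIdx_cons_pos bgs c t s hbg] at h ⊢
        rw [ih (s+1) h, leadBg_cons_pos bgs c t hbg]
        congr 1; push_cast; ring
      · rw [nbIdx_cons_neg bgs c t s (by simpa using hbg),
          leadBg_cons_neg bgs c t (by simpa using hbg)]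
        simp

theorem nbIdx_append (bgs : List String) (c : Char) (cs : List Char) : ∀ (s : Int),
    nbIdx bgs (cs ++ [c]) s
      = nbIdx bgs cs s ++ (if pvIsBg bgs c then [] else [s + (cs.length : Int)]) := by
  induction cs with
  | nil =>
      intro s
      by_cases hbg : pvIsBg bgs c = true
      · simp [nbIdx_cons_pos bgs c [] s hbg, nbIdx, hbg]
      · simp [nbIdx_cons_neg bgs c [] s (by simpa using hbg), nbIdx, hbg]
  | cons d t ih =>
      intro s
      simp only [List.cons_append]
      by_cases hbg : pvIsBg bgs d = true
      · rw [nbIdx_cons_pos bgs d _ s hbg, nbIdx_cons_pos bgs d t s hbg, ih (s+1)]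
        congr 3
        simp only [List.length_cons]; push_cast; ring
      · rw [nbIdx_cons_neg bgs d _ s (by simpa using hbg),
          nbIdx_cons_neg bgs d t s (by simpa using hbg), ih (s+1)]
        simp only [List.cons_append]
        congr 4
        simp only [List.length_cons]; push_cast; ring

theorem nbIdx_eq_nil_iff (bgs : List String) (cs : List Char) : ∀ (s : Int),
    nbIdx bgs cs s = [] ↔ ∀ c ∈ cs, pvIsBg bgs c = true := by
  induction cs with
  | nil => intro s; simp [nbIdx]
  | cons c t ih =>
      intro s
      by_cases hbg : pvIsBg bgs c = true
      · rw [nbIdx_cons_pos bgs c t s hbg, ih (s+1)]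
        constructor
        · intro hall d hd
          rcases List.mem_cons.mp hd with rfl | hm
          · exact hbg
          · exact hall d hm
        · intro hall d hd; exact hall d (List.mem_cons_of_mem c hd)
      · rw [nbIdx_cons_neg bgs c t s (by simpa using hbg)]
        simp only [List.cons_ne_nil, false_iff]
        intro hall
        exact hbg (hall c List.mem_cons_self)

theorem nbIdx_getLast? (bgs : List String) (cs : List Char) : ∀ (s : Int), nbIdx bgs cs s ≠ [] →
    (nbIdx bgs cs s).getLast? = some (s + ((cs.length - 1 - pvLeadBg bgs cs.reverse : Nat) : Int)) := by
  induction cs using List.reverseRecOn with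
  | nil => intro s h; simp [nbIdx] at h
  | append_singleton t c ih =>
      intro s h
      rw [nbIdx_append bgs c t s] at h ⊢
      by_cases hbg : pvIsBg bgs c = true
      · rw [if_pos hbg] at h ⊢
        simp only [List.append_nil] at h ⊢
        rw [ih s h]
        have hlt : pvLeadBg bgs t.reverse < t.length := by
          have hnn : ∃ c0 ∈ t, pvIsBg bgs c0 = false := by
            by_contra hall
            apply h
            rw [nbIdx_eq_nil_iff bgs t s]
            intro d hd
            rcases Bool.eq_false_or_eq_true (pvIsBg bgs d) with ht | hf
            · exact ht
            · exact absurd ⟨d, hd, hf⟩ hall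
          have := leadBg_lt bgs t.reverse (by
            rcases hnn with ⟨c0, hc0, hf⟩
            exact ⟨c0, List.mem_reverse.mpr hc0, hf⟩)
          simpa using this
        congr 1
        rw [List.reverse_append, List.reverse_singleton, List.singleton_append,
          leadBg_cons_pos bgs c t.reverse hbg]
        simp only [List.length_append, List.length_singleton]
        omega
      · rw [if_neg (by simp [hbg])] at h ⊢
        rw [List.getLast?_concat]
        congr 1
        rw [List.reverse_append, List.reverse_singleton, List.singleton_append,
          leadBg_cons_neg bgs c t.reverse (by simpa using hbg)]
        simp only [List.length_append, List.length_singleton]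
        omega

theorem foldl_min_id (t : List Int) : ∀ (x : Int), (∀ y ∈ t, x ≤ y) → t.foldl min x = x := by
  induction t with
  | nil => intro x _; rfl
  | cons y u ih =>
      intro x h
      simp only [List.foldl_cons]
      rw [min_eq_left (h y List.mem_cons_self)]
      exact ih x (fun z hz => h z (List.mem_cons_of_mem y hz))

theorem foldl_max_sorted (t : List Int) : ∀ (x : Int), (x :: t).Pairwise (· ≤ ·) →
    t.foldl max x = (x :: t).getLast (by simp) := by
  induction t with
  | nil => intro x _; rfl
  | cons y u ih =>
      intro x h
      obtain ⟨hx, hy⟩ := List.pairwise_cons.mp h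
      simp only [List.foldl_cons]
      rw [max_eq_right (hx y List.mem_cons_self)]
      rw [ih y hy]
      simp [List.getLast_cons]

theorem min?_sorted (l : List Int) (hp : l.Pairwise (· ≤ ·)) :
    PySem.List.min? l (fun x => x) = l.head? := by
  cases l with
  | nil => simp [PySem.List.min?]
  | cons x t =>
      rw [PySem.List.min?_id_cons]
      rw [foldl_min_id t x (fun y hy => (List.pairwise_cons.mp hp).1 y hy)]
      rfl

theorem max?_sorted (l : List Int) (hp : l.Pairwise (· ≤ ·)) :
    PySem.List.max? l (fun x => x) = l.getLast? := by
  cases l with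
  | nil => simp [PySem.List.max?]
  | cons x t =>
      rw [PySem.List.max?_id_cons, foldl_max_sorted t x hp]
      rw [List.getLast?_eq_getLast]

theorem foldSet (bgs : List String) (fill : String) (m : Nat) : ∀ (a : Nat) (l0 : List String),
    a + m ≤ l0.length →
    ((List.range m).map (fun k => ((a + k : Nat) : Int))).foldl
      (fun l idx =>
        if 0 ≤ idx ∧ idx < (l.length : Int) ∧ bgs.contains (l.getD idx.toNat "")
        then l.set idx.toNat fill else l) l0
    = l0.mapIdx (fun i s => if a ≤ i ∧ i < a + m ∧ bgs.contains s then fill else s) := by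
  induction m with
  | zero =>
      intro a l0 _
      simp only [List.range_zero, List.map_nil, List.foldl_nil]
      apply List.ext_getElem (by simp)
      intro i h1 h2
      simp only [List.getElem_mapIdx]
      rw [if_neg (by omega)]
  | succ m ih =>
      intro a l0 h
      rw [List.range_succ, List.map_append, List.foldl_append]
      rw [ih a l0 (by omega)]
      simp only [List.map_cons, List.map_nil, List.foldl_cons, List.foldl_nil]
      set L := l0.mapIdx (fun i s => if a ≤ i ∧ i < a + m ∧ bgs.contains s then fill else s) with hL
      have hlen : L.length = l0.length := by simp [hL]
      have htn : ((a + m : Nat) : Int).toNat = a + m := by omega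
      have hgetL : L.getD (a + m) "" = l0[a + m]'(by omega) := by
        rw [List.getD_eq_getElem L "" (by omega)]
        simp only [hL, List.getElem_mapIdx]
        rw [if_neg (by omega)]
      by_cases hbg : bgs.contains (l0[a + m]'(by omega)) = true
      · rw [if_pos]
        · rw [htn]
          apply List.ext_getElem (by simp [hL])
          intro i h1 h2
          rw [List.getElem_set]
          simp only [hL, List.getElem_mapIdx]
          by_cases hi : a + m = i
          · rw [if_pos hi, if_pos]
            subst hi
            exact ⟨by omega, by omega, hbg⟩
          · rw [if_neg hi]
            by_cases hc1 : a ≤ i ∧ i < a + m ∧ bgs.contains (l0[i]'(by simp only [List.length_mapIdx] at h2; omega)) = true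
            · rw [if_pos hc1, if_pos ⟨hc1.1, by omega, hc1.2.2⟩]
            · rw [if_neg hc1, if_neg (by
                rintro ⟨u1, u2, u3⟩
                exact hc1 ⟨u1, by omega, u3⟩)]
        · refine ⟨by omega, by rw [hlen]; push_cast; omega, ?_⟩
          rw [htn, hgetL]; exact hbg
      · rw [if_neg]
        · apply List.ext_getElem (by simp [hL])
          intro i h1 h2
          simp only [hL, List.getElem_mapIdx]
          by_cases hi : a + m = i
          · subst hi
            rw [if_neg (by omega), if_neg (by
                rintro ⟨u1, u2, u3⟩
                exact hbg u3)]
          · by_cases hc1 : a ≤ i ∧ i < a + m ∧ bgs.contains (l0[i]'(by simp only [List.length_mapIdx] at h2; omega)) = true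
            · rw [if_pos hc1, if_pos ⟨hc1.1, by omega, hc1.2.2⟩]
            · rw [if_neg hc1, if_neg (by
                rintro ⟨u1, u2, u3⟩
                exact hc1 ⟨u1, by omega, u3⟩)]
        · rintro ⟨u1, u2, u3⟩
          rw [htn, hgetL] at u3
          exact hbg u3

theorem join_eq_flatten (l : List (List Char)) : PySem.Chars.join [] l = l.flatten := by
  induction l with
  | nil => rfl
  | cons a t ih => cases t <;> simp_all [PySem.Chars.join_cons_cons, PySem.Chars.join_singleton, PySem.Chars.join_nil]

theorem mapIdx_map {α β γ : Type} (g : α → β) (f : Nat → β → γ) (l : List α) :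
    (l.map g).mapIdx f = l.mapIdx (fun i c => f i (g c)) := by
  apply List.ext_getElem (by simp)
  intro i h1 h2
  simp [List.getElem_mapIdx]

theorem map_mapIdx {α β γ : Type} (f : Nat → α → β) (g : β → γ) (l : List α) :
    (l.mapIdx f).map g = l.mapIdx (fun i c => g (f i c)) := by
  apply List.ext_getElem (by simp)
  intro i h1 h2
  simp [List.getElem_mapIdx]

theorem mapIdx_congr {α β : Type} (f g : Nat → α → β) (l : List α)
    (h : ∀ i (hi : i < l.length), f i l[i] = g i l[i]) : l.mapIdx f = l.mapIdx g := by
  apply List.ext_getElem (by simp)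
  intro i h1 h2
  simp only [List.getElem_mapIdx]
  exact h i (by simpa using h1)

-- A's line, characterised as a per-index conditional rewrite of the characters
theorem A_line_toList (bgs : List String) (fill : String) (line : String)
    (h : ∃ c ∈ line.toList, pvIsBg bgs c = false) :
    (fillShapeLine bgs fill line).toList
      = (line.toList.mapIdx (fun i c =>
          if pvLeadBg bgs line.toList + 1 ≤ i ∧
             i < pvLeadBg bgs line.toList + 1 +
               ((line.toList.length - 1 - pvLeadBg bgs line.toList.reverse) - (pvLeadBg bgs line.toList + 1)) ∧
             pvIsBg bgs c = true
          then fill.toList else [c])).flatten := by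
  unfold fillShapeLine
  dsimp only
  set cs := line.toList with hcs
  set n := cs.length with hn
  set first := pvLeadBg bgs cs with hfirst
  set trail := pvLeadBg bgs cs.reverse with htrail
  set last := n - 1 - trail with hlastd
  have hne : nbIdx bgs cs 0 ≠ [] := nbIdx_ne_nil bgs cs 0 h
  have hflt : first < n := leadBg_lt bgs cs h
  rw [chars_eq_nbIdx bgs cs 0 []]
  rw [List.nil_append]
  rw [min?_sorted _ (nbIdx_pairwise bgs cs 0), max?_sorted _ (nbIdx_pairwise bgs cs 0)]
  rw [nbIdx_head? bgs cs 0 hne, nbIdx_getLast? bgs cs 0 hne]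
  simp only [Option.getD_some]
  rw [PySem.List.pyRange_one]
  have hm : ((0 + ((n - 1 - trail : Nat) : Int)) - (0 + (first : Int) + 1)).toNat
      = last - (first + 1) := by omega
  rw [hm]
  have hfun : (List.range (last - (first + 1))).map (fun k : Nat => 0 + (first : Int) + 1 + (k : Int))
      = (List.range (last - (first + 1))).map (fun k : Nat => (((first + 1) + k : Nat) : Int)) := by
    apply List.map_congr_left; intro k _; push_cast; ring
  rw [hfun]
  rw [foldSet bgs fill (last - (first + 1)) (first + 1) (cs.map pvToStr)
    (by simp only [List.length_map]; omega)]
  rw [mapIdx_map]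
  simp only [PySem.Str.toList_join]
  have hempty : ("" : String).toList = ([] : List Char) := rfl
  rw [hempty, join_eq_flatten, map_mapIdx]
  congr 1
  apply mapIdx_congr
  intro i hi
  have hpv : bgs.contains (pvToStr cs[i]) = pvIsBg bgs cs[i] := rfl
  rw [hpv]
  split <;> simp [pvToStr]

-- ===== B-side lemmas =====

theorem leftFlags_length (bgs : List String) : ∀ (cs : List Char) (seen : Bool),
    (leftFlags bgs cs seen).length = cs.length := by
  intro cs
  induction cs with
  | nil => intro seen; rfl
  | cons c t ih => intro seen; simp [leftFlags, ih]

theorem leftFlags_getElem (bgs : List String) : ∀ (cs : List Char) (seen : Bool) (i : Nat)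
    (h : i < (leftFlags bgs cs seen).length),
    (leftFlags bgs cs seen)[i] = (seen || ((cs.take i).any (fun c => !(pvIsBg bgs c)))) := by
  intro cs
  induction cs with
  | nil => intro seen i h; simp [leftFlags] at h
  | cons c t ih =>
      intro seen i h
      cases i with
      | zero => simp [leftFlags]
      | succ j =>
          simp only [leftFlags, List.getElem_cons_succ]
          rw [ih (seen || !(pvIsBg bgs c)) j (by simpa [leftFlags] using h)]
          simp [Bool.or_assoc]

theorem buildR_snd (bgs : List String) (fill : String) : ∀ (l : List (Char × Bool)),
    (buildR bgs fill l).2 = (l.map Prod.fst).any (fun c => !(pvIsBg bgs c)) := by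
  intro l
  induction l with
  | nil => rfl
  | cons p t ih =>
      simp only [buildR, List.map_cons, List.any_cons]
      rw [ih, Bool.or_comm]

theorem buildR_fst (bgs : List String) (fill : String) : ∀ (cs : List Char) (ls : List Bool),
    cs.length = ls.length →
    (buildR bgs fill (cs.zip ls)).1
      = ((cs.zip ls).mapIdx (fun i p =>
          if pvIsBg bgs p.1 && p.2 && ((cs.drop (i+1)).any (fun c => !(pvIsBg bgs c)))
          then fill.toList else [p.1])).flatten := by
  intro cs
  induction cs with
  | nil => intro ls _; rfl
  | cons c t ih =>
      intro ls hlen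
      cases ls with
      | nil => simp at hlen
      | cons l ls' =>
          simp only [List.zip_cons_cons, buildR, List.mapIdx_cons, List.flatten_cons]
          have hsnd : (buildR bgs fill (t.zip ls')).2 = t.any (fun c => !(pvIsBg bgs c)) := by
            rw [buildR_snd]
            congr 1
            exact List.map_fst_zip (by simp at hlen; omega)
          rw [hsnd, ih ls' (by simpa using hlen)]
          simp only [List.drop_succ_cons, List.drop_zero]
          rfl

theorem leftFlagsSeen_any (bgs : List String) : ∀ (cs : List Char) (seen : Bool),
    leftFlagsSeen bgs cs seen = (seen || cs.any (fun c => !(pvIsBg bgs c))) := by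
  intro cs
  induction cs with
  | nil => intro seen; simp [leftFlagsSeen]
  | cons c t ih => intro seen; simp [leftFlagsSeen, ih, Bool.or_assoc]

theorem B_line_toList (bgs : List String) (fill : String) (line : String)
    (h : ∃ c ∈ line.toList, pvIsBg bgs c = false) :
    (fillShapeLineAlt bgs fill line).toList
      = (line.toList.mapIdx (fun i c =>
          if (pvIsBg bgs c && ((line.toList.take i).any (fun d => !(pvIsBg bgs d)))
              && ((line.toList.drop (i+1)).any (fun d => !(pvIsBg bgs d)))) = true
          then fill.toList else [c])).flatten := by
  unfold fillShapeLineAlt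
  dsimp only
  set cs := line.toList with hcs
  have hseen : leftFlagsSeen bgs cs false = true := by
    rw [leftFlagsSeen_any]
    rcases h with ⟨c0, hc0, hf⟩
    simp only [Bool.false_or, List.any_eq_true]
    exact ⟨c0, hc0, by simp [hf]⟩
  rw [hseen]
  simp only [Bool.not_true, Bool.false_eq_true, if_false]
  rw [String.toList_ofList]
  rw [buildR_fst bgs fill cs (leftFlags bgs cs false) (by rw [leftFlags_length])]
  congr 1
  apply List.ext_getElem
  · simp [leftFlags_length]
  · intro i h1 h2
    have hicz : i < cs.length := by
      simp only [List.length_mapIdx, List.length_zip, leftFlags_length, Nat.min_self] at h1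
      exact h1
    simp only [List.getElem_mapIdx, List.getElem_zip]
    rw [leftFlags_getElem bgs cs false i (by rw [leftFlags_length]; exact hicz)]
    simp [Bool.false_or]

theorem take_any_nb (bgs : List String) : ∀ (cs : List Char) (i : Nat),
    ((cs.take i).any (fun c => !(pvIsBg bgs c)) = true)
      ↔ (pvLeadBg bgs cs < i ∧ pvLeadBg bgs cs < cs.length) := by
  intro cs
  induction cs with
  | nil => intro i; simp [pvLeadBg]
  | cons c t ih =>
      intro i
      cases i with
      | zero => simp
      | succ j =>
          by_cases hbg : pvIsBg bgs c = true
          · rw [leadBg_cons_pos bgs c t hbg]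
            simp only [List.take_succ_cons, List.any_cons, hbg, Bool.not_true, Bool.false_or,
              List.length_cons]
            rw [ih j]
            omega
          · rw [leadBg_cons_neg bgs c t (by simpa using hbg)]
            simp only [List.take_succ_cons, List.any_cons, List.length_cons]
            simp [hbg]

theorem drop_any_nb (bgs : List String) (cs : List Char) (i : Nat) :
    ((cs.drop (i+1)).any (fun c => !(pvIsBg bgs c)) = true)
      ↔ (pvLeadBg bgs cs.reverse < cs.length - (i+1) ∧ pvLeadBg bgs cs.reverse < cs.length) := by
  have h1 : (cs.drop (i+1)).any (fun c => !(pvIsBg bgs c))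
      = (cs.reverse.take (cs.length - (i+1))).any (fun c => !(pvIsBg bgs c)) := by
    rw [← List.reverse_drop, List.any_reverse]
  rw [h1, take_any_nb bgs cs.reverse (cs.length - (i+1)), List.length_reverse]

theorem fillShapeLine_eq (bgs : List String) (fill : String) (line : String)
    (h : ∃ c ∈ line.toList, pvIsBg bgs c = false) :
    fillShapeLine bgs fill line = fillShapeLineAlt bgs fill line := by
  apply String.toList_inj.mp
  rw [A_line_toList bgs fill line h, B_line_toList bgs fill line h]
  set cs := line.toList with hcs
  set n := cs.length with hn
  set first := pvLeadBg bgs cs with hfirst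
  set trail := pvLeadBg bgs cs.reverse with htrail
  have hflt : first < n := leadBg_lt bgs cs h
  have htlt : trail < n := by
    have : ∃ c ∈ cs.reverse, pvIsBg bgs c = false := by
      rcases h with ⟨c0, hc0, hf⟩; exact ⟨c0, List.mem_reverse.mpr hc0, hf⟩
    simpa using leadBg_lt bgs cs.reverse this
  congr 1
  apply mapIdx_congr
  intro i hi
  have hiff : (first + 1 ≤ i ∧ i < first + 1 + ((n - 1 - trail) - (first + 1)) ∧ pvIsBg bgs cs[i] = true)
      ↔ ((pvIsBg bgs cs[i] && ((cs.take i).any (fun d => !(pvIsBg bgs d)))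
          && ((cs.drop (i+1)).any (fun d => !(pvIsBg bgs d)))) = true) := by
    simp only [Bool.and_eq_true]
    rw [take_any_nb bgs cs i, drop_any_nb bgs cs i]
    by_cases hbg : pvIsBg bgs cs[i] = true
    · simp only [hbg, and_true, true_and]
      omega
    · simp [hbg]
  by_cases hP : first + 1 ≤ i ∧ i < first + 1 + ((n - 1 - trail) - (first + 1)) ∧ pvIsBg bgs cs[i] = true
  · rw [if_pos hP, if_pos (hiff.mp hP)]
  · rw [if_neg hP, if_neg (fun hq => hP (hiff.mpr hq))]

-- ===== VERDICT =====
theorem fillShape_spec : Claim_equal_fillShape := by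
  intro texture bgs fill _ hpre
  unfold Pre_fillShape at hpre
  simp only [List.all_eq_true, List.any_eq_true, Bool.not_eq_eq_eq_not, Bool.not_true] at hpre
  unfold Spec_fillShape fillShape fillShape_alt
  rw [PySem.List.foldl_append_singleton_eq_map]
  refine List.map_congr_left (fun line hmem => fillShapeLine_eq bgs fill line ?_)
  obtain ⟨c, hc, hcf⟩ := hpre line hmem
  exact ⟨c, hc, hcf⟩
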